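-- pv_equiv track=rewrite | github.com/norraxx/sos-hackathon | runner.py | update_path_right
-- ===== SOURCE A (Python) =====
-- def update_path_right(new_robot_map, new_robot_position, is_move=False):
--     new_row = new_robot_map[new_robot_position[1]][:(new_robot_position[0] + 1)]
--     for index in range(new_robot_position[0] + 1, len(new_robot_map[0])):
--         if new_robot_map[new_robot_position[1]][index] == "#":
--             new_row += "#"
--             break
--         elif (
--             new_robot_map[new_robot_position[1]][index] == " "
--             or new_robot_map[new_robot_position[1]][index] == "~"
--         ):
--             new_row += "*"
--         else:
--             new_row += "@"
--
--     new_robot_map[new_robot_position[1]] = new_row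
--     return new_robot_map
-- ===== SOURCE B (Python) =====
-- def update_path_right(new_robot_map, new_robot_position, is_move=False):
--     x, y = new_robot_position
--     row = new_robot_map[y]
--     width = len(new_robot_map[0])
--     prefix = row[:x + 1]
--     rest = row[x + 1:width]
--     w = rest.find('#')
--     if w == -1:
--         segment, tail = rest, ''
--     else:
--         segment, tail = rest[:w], '#'
--     transformed = ''.join('*' if c in ' ~' else '@' for c in segment)
--     new_robot_map[y] = prefix + transformed + tail
--     return new_robot_map
-- ===== Notes on version B (the rewrite author's own statement) =====
-- stated objective: simpler
-- what changed: B locates the first wall with str.find and builds the row from three independent pieces (prefix slice, mapped segment, optional '#') instead of A's fused index loop that scans, tests and breaks character by character.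
-- outside the precondition, e.g. on update_path_right(['a c'], (-2, 0), False): A returns ['a @@*@'], B returns ['a @']
import Mathlib
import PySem

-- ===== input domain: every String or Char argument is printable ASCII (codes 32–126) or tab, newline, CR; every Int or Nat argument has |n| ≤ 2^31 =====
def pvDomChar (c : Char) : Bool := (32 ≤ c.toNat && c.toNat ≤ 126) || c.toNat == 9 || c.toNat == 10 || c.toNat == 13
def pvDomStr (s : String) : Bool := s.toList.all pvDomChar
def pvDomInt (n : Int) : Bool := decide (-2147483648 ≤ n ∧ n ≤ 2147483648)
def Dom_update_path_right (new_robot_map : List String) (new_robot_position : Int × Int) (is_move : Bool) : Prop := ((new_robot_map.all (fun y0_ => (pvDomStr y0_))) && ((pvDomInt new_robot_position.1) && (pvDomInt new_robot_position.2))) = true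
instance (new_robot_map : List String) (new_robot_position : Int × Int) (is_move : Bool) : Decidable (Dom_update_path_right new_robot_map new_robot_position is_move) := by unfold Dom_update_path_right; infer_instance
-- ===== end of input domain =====

-- ===== PORT A =====

-- B computes the wall boundary first (str.find) and transforms the slice in a second pass,
-- instead of A's fused scan-and-break loop; objective: simpler decomposition, no speed claim.
-- A mutates new_robot_map in place (row y is reassigned); B performs the same mutation;
-- the equivalence proved here is about the return value.

-- ===== PORT A =====
-- loop body of A: walk the index range, break (returning) on '#', none = IndexError
def uprScanA (row : List Char) (idxs : List Int) (acc : List Char) : Option (List Char) :=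
  match idxs with
  | [] => some acc
  | i :: rest =>
    match PySem.List.pyGet? row i with
    | none => none                                   -- IndexError in Python
    | some c =>
      if c = '#' then some (acc ++ ['#'])
      else if c = ' ' ∨ c = '~' then uprScanA row rest (acc ++ ['*'])
      else uprScanA row rest (acc ++ ['@'])

def update_path_right (new_robot_map : List String) (new_robot_position : Int × Int) (is_move : Bool) : List String :=
  let x := new_robot_position.1
  let y := new_robot_position.2
  match PySem.List.pyGet? new_robot_map y, PySem.List.pyGet? new_robot_map 0,
        PySem.List.pyIdx? new_robot_map.length y with
  | some rowS, some row0S, some j =>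
    let row := rowS.toList
    let init := PySem.Chars.slice row none (some (x + 1))      -- new_robot_map[y][:x+1]
    match uprScanA row (PySem.List.pyRange (x + 1) (PySem.Chars.len row0S.toList)) init with
    | some newRow => new_robot_map.set j (String.ofList newRow)    -- new_robot_map[y] = new_row
    | none => new_robot_map                                    -- IndexError (outside Pre_)
  | _, _, _ => new_robot_map                                   -- IndexError (outside Pre_)

-- ===== PORT B =====
-- '*' for ' '/'~', '@' otherwise — B's one-pass transform of the wall-free segment
def uprTransform (seg : List Char) : List Char :=
  seg.map (fun c => if c = ' ' ∨ c = '~' then '*' else '@')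

def update_path_right_alt (new_robot_map : List String) (new_robot_position : Int × Int) (is_move : Bool) : List String :=
  let x := new_robot_position.1
  let y := new_robot_position.2
  match PySem.List.pyGet? new_robot_map y with
  | none => new_robot_map                                           -- IndexError (outside Pre_)
  | some rowS =>
  match PySem.List.pyGet? new_robot_map 0 with
  | none => new_robot_map                                           -- IndexError (outside Pre_)
  | some row0S =>
  match PySem.List.pyIdx? new_robot_map.length y with
  | none => new_robot_map                                           -- unreachable: pyGet? succeeded
  | some j =>
    let row := rowS.toList
    let width : Int := PySem.Chars.len row0S.toList
    let pre := PySem.Chars.slice row none (some (x + 1))            -- row[:x+1]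
    let rest := PySem.Chars.slice row (some (x + 1)) (some width)   -- row[x+1:width]
    let w := PySem.Chars.find rest ['#']                            -- rest.find('#')
    let segTail := if w = -1 then (rest, ([] : List Char))
                   else (PySem.Chars.slice rest none (some w), ['#'])
    new_robot_map.set j (String.ofList (pre ++ uprTransform segTail.1 ++ segTail.2))

-- ===== PRECONDITION & SPEC =====
-- Pre_ restricts to the natural domain of the game map: a non-negative x-position and a
-- valid Python row index y (A and B wrap negative y identically, so -len ≤ y is allowed);
-- non-negative scan start x+1 (so x ≥ -1); it excludes x < -1, on which A's per-index
-- negative wraparound mixes row characters accidentally, and rows shorter than the map width with no wall to the right of x, on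
-- which A raises IndexError.
def Pre_update_path_right (new_robot_map : List String) (new_robot_position : Int × Int) (is_move : Bool) : Prop :=
  -1 ≤ new_robot_position.1 ∧
  -(new_robot_map.length : Int) ≤ new_robot_position.2 ∧
  new_robot_position.2 < (new_robot_map.length : Int) ∧
  ((PySem.List.pyGetD new_robot_map 0 "").toList.length
      ≤ (PySem.List.pyGetD new_robot_map new_robot_position.2 "").toList.length
   ∨ '#' ∈ (PySem.List.pyGetD new_robot_map new_robot_position.2 "").toList.drop (new_robot_position.1 + 1).toNat)

instance (new_robot_map : List String) (new_robot_position : Int × Int) (is_move : Bool) : Decidable (Pre_update_path_right new_robot_map new_robot_position is_move) := by unfold Pre_update_path_right; infer_instance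

def pvWitness_update_path_right : List String × (Int × Int) × Bool := (["@# ~", "~  #"], (1, 1), false)

def Spec_update_path_right (new_robot_map : List String) (new_robot_position : Int × Int) (is_move : Bool) (out : List String) : Prop := out = update_path_right_alt new_robot_map new_robot_position is_move
instance (new_robot_map : List String) (new_robot_position : Int × Int) (is_move : Bool) (out : List String) : Decidable (Spec_update_path_right new_robot_map new_robot_position is_move out) := by unfold Spec_update_path_right; infer_instance

-- ===== CLAIM (what is proved, stated in full; the proofs are below) =====
def Claim_equal_update_path_right : Prop := ∀ (new_robot_map : List String) (new_robot_position : Int × Int) (is_move : Bool), Dom_update_path_right new_robot_map new_robot_position is_move → Pre_update_path_right new_robot_map new_robot_position is_move → Spec_update_path_right new_robot_map new_robot_position is_move (update_path_right new_robot_map new_robot_position is_move)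

-- ===== LEMMAS AND PROOFS =====


-- A's fused loop as a pure function of the character list it scans
def uprScanC (cs : List Char) : List Char :=
  match cs with
  | [] => []
  | c :: t => if c = '#' then ['#'] else (if c = ' ' ∨ c = '~' then '*' else '@') :: uprScanC t

theorem uprScanA_eq_scanC (row : List Char) (W : Int) :
    ∀ (i : Int) (acc : List Char), 0 ≤ i →
    (W ≤ (row.length : Int) ∨ '#' ∈ row.drop i.toNat) →
    uprScanA row (PySem.List.pyRange i W) acc
      = some (acc ++ uprScanC ((row.drop i.toNat).take (W - i).toNat)) := by
  have main : ∀ (n : Nat) (i : Int) (acc : List Char), (W - i).toNat = n → 0 ≤ i →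
      (W ≤ (row.length : Int) ∨ '#' ∈ row.drop i.toNat) →
      uprScanA row (PySem.List.pyRange i W) acc
        = some (acc ++ uprScanC ((row.drop i.toNat).take (W - i).toNat)) := by
    intro n
    induction n with
    | zero =>
      intro i acc hn hi _
      rw [PySem.List.pyRange_one_eq_nil (by omega)]
      simp [uprScanA, uprScanC, hn]
    | succ n ih =>
      intro i acc hn hi hcond
      have hiW : i < W := by omega
      rw [PySem.List.pyRange_one_cons hiW]
      by_cases hlt : i.toNat < row.length
      · have hget : PySem.List.pyGet? row i = some row[i.toNat] := by
          simp only [PySem.List.pyGet?, PySem.List.pyIdx?, if_pos hi,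
            if_pos (show i < (row.length:Int) by omega)]
          simp [List.getElem?_eq_getElem hlt]
        have hdrop : row.drop i.toNat = row[i.toNat] :: row.drop (i.toNat + 1) :=
          List.drop_eq_getElem_cons hlt
        have htake : (W - i).toNat = (W - (i+1)).toNat + 1 := by omega
        have hi1 : (i+1).toNat = i.toNat + 1 := by omega
        by_cases hwall : row[i.toNat] = '#'
        · simp only [uprScanA, hget, hdrop, htake, List.take_succ_cons,
            uprScanC, hwall]
          simp
        · have hcond' : W ≤ (row.length : Int) ∨ '#' ∈ row.drop (i+1).toNat := by
            rcases hcond with h | h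
            · exact Or.inl h
            · rw [hdrop] at h
              rcases List.mem_cons.mp h with h | h
              · exact absurd h.symm hwall
              · rw [hi1]; exact Or.inr h
          by_cases hsp : row[i.toNat] = ' ' ∨ row[i.toNat] = '~'
          · rw [show uprScanA row (i :: PySem.List.pyRange (i+1) W) acc
                = uprScanA row (PySem.List.pyRange (i+1) W) (acc ++ ['*']) by
              simp only [uprScanA, hget, if_neg hwall, if_pos hsp]]
            rw [ih (i+1) (acc ++ ['*']) (by omega) (by omega) hcond']
            simp only [hdrop, htake, List.take_succ_cons, uprScanC, if_neg hwall, if_pos hsp, hi1]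
            simp
          · rw [show uprScanA row (i :: PySem.List.pyRange (i+1) W) acc
                = uprScanA row (PySem.List.pyRange (i+1) W) (acc ++ ['@']) by
              simp only [uprScanA, hget, if_neg hwall, if_neg hsp]]
            rw [ih (i+1) (acc ++ ['@']) (by omega) (by omega) hcond']
            simp only [hdrop, htake, List.take_succ_cons, uprScanC, if_neg hwall, if_neg hsp, hi1]
            simp
      · exfalso
        rcases hcond with h | h
        · omega
        · rw [List.drop_eq_nil_of_le (by omega)] at h
          simp at h
  intro i acc hi hcond
  exact main (W - i).toNat i acc rfl hi hcond

theorem scanC_no_wall (cs : List Char) (h : '#' ∉ cs) : uprScanC cs = uprTransform cs := by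
  induction cs with
  | nil => rfl
  | cons c t ih =>
    have hc : c ≠ '#' := fun hc => h (hc ▸ List.mem_cons_self)
    simp only [uprScanC, if_neg hc, uprTransform, List.map_cons]
    exact congrArg _ (ih fun ht => h (List.mem_cons_of_mem _ ht))

theorem scanC_wall (cs : List Char) :
    ∀ (k : Nat) (hk : k < cs.length), cs[k] = '#' →
    (∀ i (hi : i < cs.length), i < k → cs[i] ≠ '#') →
    uprScanC cs = uprTransform (cs.take k) ++ ['#'] := by
  induction cs with
  | nil => intro k hk; simp at hk
  | cons c t ih =>
    intro k hk hwall hmin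
    cases k with
    | zero => simp at hwall; simp [uprScanC, hwall, uprTransform]
    | succ k =>
      have hc : c ≠ '#' := hmin 0 (by simp) (Nat.succ_pos k)
      simp only [uprScanC, if_neg hc, List.take_succ_cons, uprTransform, List.map_cons,
        List.cons_append]
      refine congrArg _ (ih k (by simpa using hk) (by simpa using hwall) ?_)
      intro i hi hik
      have := hmin (i+1) (by simpa using hi) (by omega)
      simpa using this

theorem scanC_find (cs : List Char) :
    uprScanC cs = (if PySem.Chars.find cs ['#'] = -1 then uprTransform cs
      else uprTransform (cs.take (PySem.Chars.find cs ['#']).toNat) ++ ['#']) := by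
  by_cases h : PySem.Chars.find cs ['#'] = -1
  · rw [if_pos h, scanC_no_wall]
    intro hmem
    exact ((PySem.Chars.find_eq_neg_one_iff cs ['#']).mp h)
      ((List.singleton_infix_iff '#' cs).mpr hmem)
  · rw [if_neg h]
    have h0 : 0 ≤ PySem.Chars.find cs ['#'] := by
      have := PySem.Chars.neg_one_le_find cs ['#']
      omega
    obtain ⟨hpre, hmin⟩ := PySem.Chars.find_spec h0
    set k := (PySem.Chars.find cs ['#']).toNat with hkdef
    obtain ⟨t, ht⟩ := hpre
    have hklen : k < cs.length := by
      have := congrArg List.length ht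
      simp [List.length_drop] at this
      omega
    have hk : cs[k] = '#' := by
      have h2 := List.drop_eq_getElem_cons hklen
      rw [h2] at ht
      exact (List.cons_eq_cons.mp ht).1.symm
    refine scanC_wall cs k hklen hk ?_
    intro i hi hik hbad
    refine hmin i hik ?_
    rw [List.drop_eq_getElem_cons hi, hbad]
    exact ⟨List.drop (i+1) cs, rfl⟩


-- ===== VERDICT (by name: the statement is the Claim_ definition above) =====
theorem update_path_right_spec : Claim_equal_update_path_right := by
  intro m pos is_move _ hpre
  obtain ⟨hx, hylo, hyhi, hcond⟩ := hpre
  unfold Spec_update_path_right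
  have hm0 : 0 < m.length := by omega
  obtain ⟨j, hj, hjlt⟩ : ∃ j, PySem.List.pyIdx? m.length pos.2 = some j ∧ j < m.length := by
    unfold PySem.List.pyIdx?
    by_cases h0 : 0 ≤ pos.2
    · exact ⟨pos.2.toNat, by rw [if_pos h0, if_pos (by omega)], by omega⟩
    · exact ⟨m.length - (-pos.2).toNat, by rw [if_neg h0, if_pos (by omega)], by omega⟩
  have hgy : PySem.List.pyGet? m pos.2 = some m[j] := by
    simp [PySem.List.pyGet?, hj, List.getElem?_eq_getElem hjlt]
  have hg0 : PySem.List.pyGet? m 0 = some m[0] := by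
    simp [PySem.List.pyGet?, PySem.List.pyIdx?, hm0]
  have hcast : pos.1 + 1 = (((pos.1 + 1).toNat : Nat) : Int) := by omega
  simp only [PySem.List.pyGetD, hgy, hg0, Option.getD_some] at hcond
  simp only [update_path_right, update_path_right_alt, hgy, hg0, hj,
    PySem.Chars.len_eq, PySem.Chars.slice_eq_listSlice]
  set row := m[j].toList with hrow
  set W : Int := (m[0].toList.length : Int) with hW
  have hcond' : W ≤ (row.length : Int) ∨ '#' ∈ row.drop (pos.1 + 1).toNat := by
    rw [hW]
    rcases hcond with h | h
    · exact Or.inl (by exact_mod_cast h)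
    · exact Or.inr h
  rw [uprScanA_eq_scanC row W (pos.1 + 1) (PySem.List.slice row none (some (pos.1 + 1)))
    (by omega) hcond']
  refine congrArg (fun s => m.set j (String.ofList s)) ?_
  set cs := (row.drop (pos.1 + 1).toNat).take (W - (pos.1 + 1)).toNat with hcs
  have hrest : PySem.List.slice row (some (pos.1 + 1)) (some W) = cs := by
    rw [hcast, hW, PySem.List.slice_natCast]
    simp only [hcs]
    congr 1
    omega
  rw [hrest, scanC_find cs]
  by_cases hf : PySem.Chars.find cs ['#'] = -1
  · simp [hf]
  · have h0 : 0 ≤ PySem.Chars.find cs ['#'] := by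
      have := PySem.Chars.neg_one_le_find cs ['#']
      omega
    simp only [if_neg hf]
    rw [PySem.List.slice_to cs h0]
    simp
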